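-- pv_equiv track=rewrite | github.com/JeffBoss625/peep-rpg | lib/dungeon.py | _calc_turn_sequence
-- ===== SOURCE A (Python) =====
-- def _calc_turn_sequence(peepsbyclicks, tot_clicks):
--     # walk through tot_clicks and sequence monster moves for every click
--     ret = [[] for _ in range(tot_clicks)]
--     for click_count in range(1, tot_clicks + 1):
--         for clicks in peepsbyclicks.keys():
--             if click_count % clicks == 0:
--                 peeps = peepsbyclicks[clicks]
--                 for p in peeps:
--                     ret[click_count - 1].append(p)
--     return ret
-- ===== SOURCE B (Python) =====
-- def _calc_turn_sequence(peepsbyclicks, tot_clicks):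
--     # scatter into a dict keyed by click: each interval touches only its own multiples
--     rows = {}
--     for clicks, peeps in peepsbyclicks.items():
--         step = abs(clicks)
--         for click in range(step, tot_clicks + 1, step):
--             rows[click] = rows.get(click, []) + peeps
--     return [rows.get(click, []) for click in range(1, tot_clicks + 1)]
-- ===== Notes on version B (the rewrite author's own statement) =====
-- stated objective: faster
-- what changed: Instead of scanning every key at every click with a modulus test into a preallocated list of rows, B scatters each interval's peeps over its arithmetic progression of multiples into a dict keyed by click and then reads the rows back.
-- outside the precondition, e.g. on _calc_turn_sequence({0: []}, 0): A returns [], B raises ValueError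
import Mathlib
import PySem

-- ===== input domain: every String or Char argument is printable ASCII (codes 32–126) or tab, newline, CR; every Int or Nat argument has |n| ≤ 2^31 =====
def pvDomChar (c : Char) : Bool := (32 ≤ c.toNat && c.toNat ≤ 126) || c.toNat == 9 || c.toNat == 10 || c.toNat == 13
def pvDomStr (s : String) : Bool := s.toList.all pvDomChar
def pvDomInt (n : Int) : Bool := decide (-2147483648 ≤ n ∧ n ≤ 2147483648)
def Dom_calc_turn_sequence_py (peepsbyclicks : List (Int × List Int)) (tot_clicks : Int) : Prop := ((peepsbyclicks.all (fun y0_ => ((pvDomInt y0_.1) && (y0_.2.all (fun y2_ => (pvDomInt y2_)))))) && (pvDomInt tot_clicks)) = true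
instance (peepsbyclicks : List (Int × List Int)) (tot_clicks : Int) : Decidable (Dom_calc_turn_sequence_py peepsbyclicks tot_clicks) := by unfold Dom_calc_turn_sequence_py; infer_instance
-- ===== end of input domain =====

-- B replaces A's per-click scan over all keys (modulus test each time) by a per-key scatter
-- over that key's multiples into a dict keyed by click, read back at the end — fewer iterations.

-- ===== PORT A =====
def calc_turn_sequence_py (peepsbyclicks : List (Int × List Int)) (tot_clicks : Int) : List (List Int) :=
  let d := PySem.Dict.ofList peepsbyclicks
  -- ret = [[] for _ in range(tot_clicks)]
  let ret := (PySem.List.pyRange 0 tot_clicks 1).map (fun _ => ([] : List Int))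
  -- for click_count in range(1, tot_clicks + 1): for clicks in d.keys(): if click_count % clicks == 0: for p in d[clicks]: ret[click_count-1].append(p)
  (PySem.List.pyRange 1 (tot_clicks + 1) 1).foldl (fun ret click_count =>
    d.keys.foldl (fun ret clicks =>
      if PySem.Int.mod click_count clicks == 0 then
        (d.getD clicks []).foldl (fun ret p =>
          -- click_count ≥ 1, so click_count - 1 is a valid non-negative index
          ret.modify (click_count - 1).toNat (fun row => row ++ [p])) ret
      else ret) ret) ret

-- ===== PORT B =====
def calc_turn_sequence_py_alt (peepsbyclicks : List (Int × List Int)) (tot_clicks : Int) : List (List Int) :=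
  let d := PySem.Dict.ofList peepsbyclicks
  -- rows = {}; for clicks, peeps in d.items(): step = abs(clicks);
  --   for click in range(step, tot_clicks+1, step): rows[click] = rows.get(click, []) + peeps
  let rows := d.items.foldl (fun rows kv =>
    let step := |kv.1|
    (PySem.List.pyRange step (tot_clicks + 1) step).foldl (fun rows click =>
      rows.insert click (rows.getD click [] ++ kv.2)) rows) PySem.Dict.empty
  -- return [rows.get(click, []) for click in range(1, tot_clicks + 1)]
  (PySem.List.pyRange 1 (tot_clicks + 1) 1).map (fun click => rows.getD click [])

-- ===== PRECONDITION & SPEC =====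
-- Pre_ excludes dicts containing the key 0: there A raises ZeroDivisionError on the first click
-- (and B's range(step, …, step) raises ValueError); when tot_clicks ≤ 0 A happens to return []
-- before reaching the division, but B still raises, so all zero-key inputs are excluded.
def Pre_calc_turn_sequence_py (peepsbyclicks : List (Int × List Int)) (tot_clicks : Int) : Prop :=
  ∀ kv ∈ peepsbyclicks, kv.1 ≠ 0
instance (peepsbyclicks : List (Int × List Int)) (tot_clicks : Int) : Decidable (Pre_calc_turn_sequence_py peepsbyclicks tot_clicks) := by unfold Pre_calc_turn_sequence_py; infer_instance

def pvWitness_calc_turn_sequence_py : (List (Int × List Int)) × Int := ([(2, [7]), (3, [9])], 6)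

def Spec_calc_turn_sequence_py (peepsbyclicks : List (Int × List Int)) (tot_clicks : Int) (out : List (List Int)) : Prop := out = calc_turn_sequence_py_alt peepsbyclicks tot_clicks
instance (peepsbyclicks : List (Int × List Int)) (tot_clicks : Int) (out : List (List Int)) : Decidable (Spec_calc_turn_sequence_py peepsbyclicks tot_clicks out) := by unfold Spec_calc_turn_sequence_py; infer_instance

-- ===== CLAIM (what is proved, stated in full; the proofs are below) =====
def Claim_equal_calc_turn_sequence_py : Prop := ∀ (peepsbyclicks : List (Int × List Int)) (tot_clicks : Int), Dom_calc_turn_sequence_py peepsbyclicks tot_clicks → Pre_calc_turn_sequence_py peepsbyclicks tot_clicks → Spec_calc_turn_sequence_py peepsbyclicks tot_clicks (calc_turn_sequence_py peepsbyclicks tot_clicks)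

-- ===== LEMMAS AND PROOFS =====

-- the row both programs build at click c: the peeps of every key dividing c, in dict order
def pvRow (kvs : List (Int × List Int)) (c : Int) (row : List Int) : List Int :=
  kvs.foldl (fun row kv => if PySem.Int.mod c kv.1 == 0 then row ++ kv.2 else row) row

lemma pv_modify_modify {α : Type} (l : List α) (j : Nat) (f g : α → α) :
    (l.modify j f).modify j g = l.modify j (fun x => g (f x)) := by
  apply List.ext_getElem (by simp [List.length_modify])
  intro i h1 h2
  simp only [List.getElem_modify]
  split <;> simp_all

lemma pv_modify_id {α : Type} (l : List α) (j : Nat) (f : α → α) (hf : ∀ x, f x = x) :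
    l.modify j f = l := by
  apply List.ext_getElem (by simp [List.length_modify])
  intro i h1 h2
  simp only [List.getElem_modify]
  split <;> simp [hf]

-- the append-one-peep loop at a fixed index is one append of the whole peeps list
lemma pv_peepsFold (ps : List Int) (j : Nat) (r : List (List Int)) :
    ps.foldl (fun r p => r.modify j (fun row => row ++ [p])) r = r.modify j (fun row => row ++ ps) := by
  induction ps generalizing r with
  | nil => simp [pv_modify_id]
  | cons p ps ih =>
      simp only [List.foldl_cons, ih, pv_modify_modify]
      congr 1
      funext row
      simp

-- a fold of guarded modifies at one fixed index is one modify with the guarded row fold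
lemma pv_condFold {α : Type} (ks : List α) (P : α → Bool) (g : α → List Int → List Int) (j : Nat)
    (r : List (List Int)) :
    ks.foldl (fun r k => if P k then r.modify j (g k) else r) r
      = r.modify j (fun row => ks.foldl (fun row k => if P k then g k row else row) row) := by
  induction ks generalizing r with
  | nil => simp [pv_modify_id]
  | cons k ks ih =>
      simp only [List.foldl_cons]
      by_cases h : P k
      · simp only [h, if_pos, ih, pv_modify_modify]
      · simp only [h, Bool.false_eq_true, if_neg, ih, not_false_iff]

lemma pv_scatter_len {α : Type} (ms : List Int) (g : Int → α → α) (xs : List α) :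
    (ms.foldl (fun r m => r.modify (m - 1).toNat (g m)) xs).length = xs.length := by
  induction ms generalizing xs with
  | nil => rfl
  | cons m ms ih =>
      simp only [List.foldl_cons]
      rw [ih, List.length_modify]

-- a scatter of modifies at distinct indices m-1 (m ≥ 1), read back pointwise
lemma pv_scatter_getElem {α : Type} (ms : List Int) (h1 : ∀ m ∈ ms, 1 ≤ m) (hnd : ms.Nodup)
    (g : Int → α → α) (xs : List α) (i : Nat) (hi : i < xs.length)
    (hi' : i < (ms.foldl (fun r m => r.modify (m - 1).toNat (g m)) xs).length) :
    (ms.foldl (fun r m => r.modify (m - 1).toNat (g m)) xs)[i]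
      = if ((i : Int) + 1) ∈ ms then g ((i : Int) + 1) xs[i] else xs[i] := by
  induction ms generalizing xs with
  | nil => simp
  | cons m ms ih =>
      have hm1 : 1 ≤ m := h1 m List.mem_cons_self
      have hmnot : m ∉ ms := (List.nodup_cons.mp hnd).1
      have hlen : i < (xs.modify (m - 1).toNat (g m)).length := by
        rw [List.length_modify]; exact hi
      simp only [List.foldl_cons] at hi' ⊢
      rw [ih (fun x hx => h1 x (List.mem_cons_of_mem _ hx)) hnd.of_cons _ hlen hi']
      have hidx : ((m - 1).toNat = i) ↔ m = (i : Int) + 1 := by omega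
      by_cases hmem : ((i : Int) + 1) ∈ ms
      · have hne : m ≠ (i : Int) + 1 := fun h => hmnot (h ▸ hmem)
        rw [if_pos hmem, if_pos (List.mem_cons_of_mem _ hmem), List.getElem_modify,
            if_neg (fun h => hne (hidx.mp h))]
      · rw [if_neg hmem, List.getElem_modify]
        by_cases he : m = (i : Int) + 1
        · subst he
          rw [if_pos (hidx.mpr rfl), if_pos List.mem_cons_self]
        · rw [if_neg (fun h => he (hidx.mp h)),
              if_neg (by simp only [List.mem_cons]; rintro (h | h); exact he h.symm; exact hmem h)]

lemma pv_nodup_pyRange_pos (a b s : Int) (hs : 0 < s) : (PySem.List.pyRange a b s).Nodup := by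
  rw [PySem.List.pyRange_of_pos a b hs]
  refine List.Nodup.map ?_ (List.nodup_range)
  intro x y h
  simp only [add_right_inj] at h
  exact_mod_cast mul_left_cancel₀ hs.ne' h

-- for 1 ≤ c ≤ tot and k ≠ 0: c is in the multiples progression of |k| iff k divides c
lemma pv_mem_mult (k c tot : Int) (hk : k ≠ 0) (hc1 : 1 ≤ c) (hc2 : c ≤ tot) :
    (c ∈ PySem.List.pyRange |k| (tot + 1) |k|) ↔ (PySem.Int.mod c k == 0) = true := by
  have hpos : (0 : Int) < |k| := abs_pos.mpr hk
  rw [beq_iff_eq, PySem.Int.mod_eq_zero_iff_dvd, PySem.List.mem_pyRange_iff_of_pos hpos]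
  constructor
  · rintro ⟨hle, _, hdvd⟩
    have habs : |k| ∣ c := by
      have h : c = (c - |k|) + |k| := by ring
      rw [h]; exact dvd_add hdvd dvd_rfl
    exact (abs_dvd k c).mp habs
  · intro hdvd
    have habs : |k| ∣ c := (abs_dvd k c).mpr hdvd
    exact ⟨Int.le_of_dvd (by omega) habs, by omega, dvd_sub habs dvd_rfl⟩

-- one interval's scatter of inserts into the dict, read back at click c
lemma pv_dict_scatter (ms : List Int) (hnd : ms.Nodup) (ps : List Int)
    (h : PySem.Dict Int (List Int)) (c : Int) :
    (ms.foldl (fun h m => h.insert m (h.getD m [] ++ ps)) h).getD c []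
      = if c ∈ ms then h.getD c [] ++ ps else h.getD c [] := by
  induction ms generalizing h with
  | nil => simp
  | cons m ms ih =>
      have hmnot : m ∉ ms := (List.nodup_cons.mp hnd).1
      simp only [List.foldl_cons]
      rw [ih hnd.of_cons]
      by_cases hmem : c ∈ ms
      · have hne : c ≠ m := fun h => hmnot (h ▸ hmem)
        rw [if_pos hmem, if_pos (List.mem_cons_of_mem _ hmem),
            PySem.Dict.getD_insert, if_neg hne]
      · rw [if_neg hmem, PySem.Dict.getD_insert]
        by_cases he : c = m
        · subst he
          simp
        · rw [if_neg he,
              if_neg (by simp only [List.mem_cons]; rintro (h | h); exact he h; exact hmem h)]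

-- B's dict after processing the items, read back at any click 1 ≤ c ≤ tot: the row fold
lemma pv_dictB (tot : Int) (kvs : List (Int × List Int)) (hk : ∀ kv ∈ kvs, kv.1 ≠ 0)
    (h : PySem.Dict Int (List Int)) (c : Int) (hc1 : 1 ≤ c) (hc2 : c ≤ tot) :
    (kvs.foldl (fun h kv =>
        (PySem.List.pyRange |kv.1| (tot + 1) |kv.1|).foldl (fun h m =>
          h.insert m (h.getD m [] ++ kv.2)) h) h).getD c []
      = pvRow kvs c (h.getD c []) := by
  induction kvs generalizing h with
  | nil => rfl
  | cons kv kvs ih =>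
      have hk0 : kv.1 ≠ 0 := hk kv List.mem_cons_self
      have hpos : (0 : Int) < |kv.1| := abs_pos.mpr hk0
      simp only [List.foldl_cons]
      rw [ih (fun x hx => hk x (List.mem_cons_of_mem _ hx))]
      rw [pv_dict_scatter _ (pv_nodup_pyRange_pos _ _ _ hpos)]
      simp only [pvRow, List.foldl_cons, pv_mem_mult kv.1 c tot hk0 hc1 hc2]

-- A rewritten: the per-click pass over the dict is one modify at index c-1 with the row fold
lemma pv_A_eq (pb : List (Int × List Int)) (tot : Int) :
    calc_turn_sequence_py pb tot
      = (PySem.List.pyRange 1 (tot + 1) 1).foldl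
          (fun ret c => ret.modify (c - 1).toNat (pvRow (PySem.Dict.ofList pb).items c))
          ((PySem.List.pyRange 0 tot 1).map (fun _ => ([] : List Int))) := by
  unfold calc_turn_sequence_py
  refine PySem.List.foldl_congr_mem _ _ _ _ ?_
  intro ret c hc
  have hstep : ∀ (r : List (List Int)), ∀ k ∈ (PySem.Dict.ofList pb).keys,
      (if PySem.Int.mod c k == 0 then
        ((PySem.Dict.ofList pb).getD k []).foldl (fun r p =>
          r.modify (c - 1).toNat (fun row => row ++ [p])) r
      else r)
      = (if PySem.Int.mod c k == 0 then
          r.modify (c - 1).toNat (fun row => row ++ (PySem.Dict.ofList pb).getD k []) else r) := by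
    intro r k _
    split
    · exact pv_peepsFold _ _ _
    · rfl
  rw [PySem.List.foldl_congr_mem _ _ _ _ hstep]
  rw [pv_condFold ((PySem.Dict.ofList pb).keys) (fun k => PySem.Int.mod c k == 0)
        (fun k row => row ++ (PySem.Dict.ofList pb).getD k []) (c - 1).toNat ret]
  congr 1
  funext row
  rw [pvRow, PySem.Dict.items_eq_map_keys _ (PySem.Dict.nodup_keys_ofList pb) ([] : List Int),
      List.foldl_map]

lemma pv_keys_ofList_ne_zero (pb : List (Int × List Int)) (hpre : ∀ kv ∈ pb, kv.1 ≠ 0) :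
    ∀ kv ∈ (PySem.Dict.ofList pb).items, kv.1 ≠ 0 := by
  intro kv hkv
  have h1 : kv.1 ∈ (PySem.Dict.ofList pb).keys := PySem.Dict.mem_keys_of_mem_items _ hkv
  have hkeys : (PySem.Dict.ofList pb).keys = PySem.Set.ofList (pb.map Prod.fst) := by
    have h := PySem.Dict.keys_foldl_insert_key pb Prod.fst
      (fun (_ : PySem.Dict Int (List Int)) (x : Int × List Int) => x.2) PySem.Dict.empty
    simpa [PySem.Dict.ofList, PySem.Dict.update, PySem.Set.update_nil_left] using h
  rw [hkeys, PySem.Set.mem_ofList] at h1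
  obtain ⟨p, hp, hfst⟩ := List.mem_map.mp h1
  exact hfst ▸ hpre p hp

-- index i of range(a, b) (step 1) is a + i
lemma pv_pyRange_one_getElem (a b : Int) (i : Nat)
    (h : i < (PySem.List.pyRange a b 1).length) :
    (PySem.List.pyRange a b 1)[i] = a + i := by
  simp only [PySem.List.pyRange_of_pos a b (by norm_num : (0:Int) < 1), List.getElem_map,
    List.getElem_range]
  ring

-- ===== VERDICT (by name: the statement is the Claim_ definition above) =====
theorem calc_turn_sequence_py_spec : Claim_equal_calc_turn_sequence_py := by
  intro pb tot hdom hpre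
  unfold Spec_calc_turn_sequence_py
  have hk := pv_keys_ofList_ne_zero pb hpre
  rw [pv_A_eq]
  have hge1 : ∀ m ∈ PySem.List.pyRange 1 (tot + 1) 1, 1 ≤ m :=
    fun m hm => (PySem.List.mem_pyRange_one.mp hm).1
  apply List.ext_getElem
  · simp only [calc_turn_sequence_py_alt, pv_scatter_len, List.length_map,
      PySem.List.length_pyRange_one]
    omega
  · intro i h1 h2
    have hi0 : i < ((PySem.List.pyRange 0 tot 1).map (fun _ => ([] : List Int))).length := by
      have h := h1
      rwa [pv_scatter_len] at h
    have hitot : ((i : Int)) + 1 ≤ tot := by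
      rw [List.length_map, PySem.List.length_pyRange_one] at hi0
      omega
    rw [pv_scatter_getElem _ hge1 (PySem.List.nodup_pyRange_one 1 (tot + 1)) _ _ i hi0 h1,
        if_pos (PySem.List.mem_pyRange_one.mpr ⟨by omega, by omega⟩)]
    simp only [calc_turn_sequence_py_alt, List.getElem_map]
    have hlen : i < (PySem.List.pyRange 1 (tot + 1) 1).length := by
      rw [PySem.List.length_pyRange_one]
      omega
    rw [pv_pyRange_one_getElem 1 (tot + 1) i hlen]
    have hc : (1 : Int) + i = (i : Int) + 1 := by ring
    rw [hc, pv_dictB tot _ hk PySem.Dict.empty ((i : Int) + 1) (by omega) hitot]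
    simp [PySem.Dict.getD_empty]
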